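-- pv_equiv track=rewrite | github.com/DFieldFL/publix-bogo-notification | publix_bogos/bogos.py | __isBogo
-- ===== SOURCE A (Python) =====
-- def __isBogo(saleText):
--     lowerText = saleText.lower()
--     # Text for stating an item is BOGO is not the same every week
--     bogoText = [
--         "buy 1 get 1 free",
--         "buy one get one free",
--         "buy one get 1 free",
--         "buy 1 get one free",
--     ]
--     return any(s in lowerText for s in bogoText)
-- ===== SOURCE B (Python) =====
-- def __isBogo(saleText):
--     # Single left-to-right scan: at each position try to match the phrase
--     # "buy <num> get <num> free" with <num> in {"one", "1"}, instead of
--     # four separate substring searches.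
--     t = saleText.lower()
--
--     def after_num(s):
--         if s.startswith("one"):
--             return s[3:]
--         if s.startswith("1"):
--             return s[1:]
--         return None
--
--     def phrase_at(s):
--         if not s.startswith("buy "):
--             return False
--         r = after_num(s[4:])
--         if r is None:
--             return False
--         if not r.startswith(" get "):
--             return False
--         r2 = after_num(r[5:])
--         if r2 is None:
--             return False
--         return r2.startswith(" free")
--
--     while True:
--         if phrase_at(t):
--             return True
--         if not t:
--             return False
--         t = t[1:]
-- ===== Notes on version B (the rewrite author's own statement) =====
-- stated objective: alternative
-- what changed: Replaced the four independent substring searches over a literal phrase list by a single left-to-right positional scan that matches the one pattern buy-(one|1)-get-(one|1)-free at each position.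
import Mathlib
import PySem

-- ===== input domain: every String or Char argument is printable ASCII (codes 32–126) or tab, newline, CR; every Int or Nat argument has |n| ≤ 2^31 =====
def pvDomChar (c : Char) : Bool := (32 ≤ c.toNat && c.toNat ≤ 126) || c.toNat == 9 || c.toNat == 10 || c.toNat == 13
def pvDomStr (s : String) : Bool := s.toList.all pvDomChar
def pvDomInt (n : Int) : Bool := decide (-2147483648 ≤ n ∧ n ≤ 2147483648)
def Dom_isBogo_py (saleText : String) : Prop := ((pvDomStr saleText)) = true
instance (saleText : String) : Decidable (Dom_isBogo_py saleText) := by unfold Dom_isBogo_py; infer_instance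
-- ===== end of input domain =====

-- B replaces A's four substring searches by one positional scan matching the single
-- pattern buy-(one|1)-get-(one|1)-free (objective: alternative; not faster).

-- ===== PORT A =====
def isBogo_py (saleText : String) : Bool :=
  let lowerText := PySem.Str.lower saleText
  let bogoText : List String :=
    ["buy 1 get 1 free", "buy one get one free", "buy one get 1 free", "buy 1 get one free"]
  bogoText.any (fun s => PySem.Str.isIn s lowerText)

-- ===== PORT B =====
-- Source B's after_num: consume "one" or "1" at the front, else None
def pvAfterNum (s : List Char) : Option (List Char) :=
  if PySem.Chars.startswith s ['o', 'n', 'e'] then some (s.drop 3)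
  else if PySem.Chars.startswith s ['1'] then some (s.drop 1)
  else none

-- Source B's phrase_at: does the full phrase start here?
def pvPhraseAt (s : List Char) : Bool :=
  if PySem.Chars.startswith s "buy ".toList then
    match pvAfterNum (s.drop 4) with
    | none => false
    | some r =>
      if PySem.Chars.startswith r " get ".toList then
        match pvAfterNum (r.drop 5) with
        | none => false
        | some r2 => PySem.Chars.startswith r2 " free".toList
      else false
  else false

-- Source B's while loop: try each position, shrinking the text by one character
def pvScan (t : List Char) : Bool :=
  match t with
  | [] => pvPhraseAt []
  | c :: rest => pvPhraseAt (c :: rest) || pvScan rest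

def isBogo_py_alt (saleText : String) : Bool :=
  pvScan (PySem.Chars.lower saleText.toList)

-- ===== PRECONDITION & SPEC =====
def Spec_isBogo_py (saleText : String) (out : Bool) : Prop := out = isBogo_py_alt saleText
instance (saleText : String) (out : Bool) : Decidable (Spec_isBogo_py saleText out) := by unfold Spec_isBogo_py; infer_instance

-- ===== CLAIM (what is proved, stated in full; the proofs are below) =====
def Claim_equal_isBogo_py : Prop := ∀ (saleText : String), Dom_isBogo_py saleText → Spec_isBogo_py saleText (isBogo_py saleText)

-- ===== LEMMAS AND PROOFS =====

-- decompose a concatenated prefix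
theorem pv_prefix_append_iff (p q s : List Char) :
    (p ++ q) <+: s ↔ (p <+: s ∧ q <+: s.drop p.length) := by
  induction p generalizing s with
  | nil => simp
  | cons a p ih =>
    cases s with
    | nil => simp
    | cons b s =>
      simp only [List.cons_append, List.cons_prefix_cons, List.length_cons, List.drop_succ_cons,
        ih, and_assoc]

theorem pv_afterNum_one (s : List Char) (h : ['o','n','e'] <+: s) :
    pvAfterNum s = some (s.drop 3) := by
  simp [pvAfterNum, PySem.Chars.startswith_iff, h]

theorem pv_afterNum_1 (s : List Char) (h : ['1'] <+: s) :
    pvAfterNum s = some (s.drop 1) := by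
  have hne : ¬ (['o','n','e'] <+: s) := by
    intro hc
    obtain ⟨t, ht⟩ := hc
    obtain ⟨u, hu⟩ := h
    rw [← ht] at hu
    simp at hu
  simp [pvAfterNum, PySem.Chars.startswith_iff, hne, h]

theorem pv_afterNum_some (s r : List Char) (h : pvAfterNum s = some r) :
    (['o','n','e'] <+: s ∧ r = s.drop 3) ∨ (['1'] <+: s ∧ r = s.drop 1) := by
  unfold pvAfterNum at h
  split_ifs at h with h1 h2
  · exact Or.inl ⟨(PySem.Chars.startswith_iff s _).mp h1, by simpa using h.symm⟩
  · exact Or.inr ⟨(PySem.Chars.startswith_iff s _).mp h2, by simpa using h.symm⟩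

-- assembling a successful match
theorem pv_phraseAt_build (s r r2 : List Char)
    (hb : PySem.Chars.startswith s "buy ".toList = true)
    (hA : pvAfterNum (s.drop 4) = some r)
    (hg : PySem.Chars.startswith r " get ".toList = true)
    (hB : pvAfterNum (r.drop 5) = some r2)
    (hf : PySem.Chars.startswith r2 " free".toList = true) :
    pvPhraseAt s = true := by
  simp only [pvPhraseAt, hb, hA, hg, hB, hf, if_true]

-- the phrase matcher recognises exactly the four literal phrases as prefixes
theorem pv_phraseAt_iff (s : List Char) :
    pvPhraseAt s = true ↔
      ("buy 1 get 1 free".toList <+: s ∨ "buy one get one free".toList <+: s ∨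
       "buy one get 1 free".toList <+: s ∨ "buy 1 get one free".toList <+: s) := by
  constructor
  · intro h
    unfold pvPhraseAt at h
    split_ifs at h with hb
    · cases hA : pvAfterNum (s.drop 4) with
      | none => rw [hA] at h; simp at h
      | some r =>
        rw [hA] at h
        replace h : (if PySem.Chars.startswith r " get ".toList = true then
            (match pvAfterNum (r.drop 5) with
             | none => false
             | some r2 => PySem.Chars.startswith r2 " free".toList)
          else false) = true := h
        split_ifs at h with hg
        · cases hB : pvAfterNum (r.drop 5) with
          | none => rw [hB] at h; simp at h
          | some r2 =>
            rw [hB] at h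
            replace h : PySem.Chars.startswith r2 " free".toList = true := h
            have hb' := (PySem.Chars.startswith_iff s _).mp hb
            have hg' := (PySem.Chars.startswith_iff r _).mp hg
            have hf' := (PySem.Chars.startswith_iff r2 _).mp h
            rcases pv_afterNum_some _ _ hA with ⟨h1, hr⟩ | ⟨h1, hr⟩ <;>
              rcases pv_afterNum_some _ _ hB with ⟨h2, hr2⟩ | ⟨h2, hr2⟩ <;>
              subst hr <;> subst hr2
            · refine Or.inr (Or.inl ?_)
              show ("buy ".toList ++ ("one".toList ++ (" get ".toList ++ ("one".toList ++ " free".toList)))) <+: s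
              rw [pv_prefix_append_iff]
              refine ⟨hb', ?_⟩
              rw [pv_prefix_append_iff]
              refine ⟨h1, ?_⟩
              rw [pv_prefix_append_iff]
              exact ⟨hg', by rw [pv_prefix_append_iff]; exact ⟨h2, hf'⟩⟩
            · refine Or.inr (Or.inr (Or.inl ?_))
              show ("buy ".toList ++ ("one".toList ++ (" get ".toList ++ ("1".toList ++ " free".toList)))) <+: s
              rw [pv_prefix_append_iff]
              refine ⟨hb', ?_⟩
              rw [pv_prefix_append_iff]
              refine ⟨h1, ?_⟩
              rw [pv_prefix_append_iff]
              exact ⟨hg', by rw [pv_prefix_append_iff]; exact ⟨h2, hf'⟩⟩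
            · refine Or.inr (Or.inr (Or.inr ?_))
              show ("buy ".toList ++ ("1".toList ++ (" get ".toList ++ ("one".toList ++ " free".toList)))) <+: s
              rw [pv_prefix_append_iff]
              refine ⟨hb', ?_⟩
              rw [pv_prefix_append_iff]
              refine ⟨h1, ?_⟩
              rw [pv_prefix_append_iff]
              exact ⟨hg', by rw [pv_prefix_append_iff]; exact ⟨h2, hf'⟩⟩
            · refine Or.inl ?_
              show ("buy ".toList ++ ("1".toList ++ (" get ".toList ++ ("1".toList ++ " free".toList)))) <+: s
              rw [pv_prefix_append_iff]
              refine ⟨hb', ?_⟩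
              rw [pv_prefix_append_iff]
              refine ⟨h1, ?_⟩
              rw [pv_prefix_append_iff]
              exact ⟨hg', by rw [pv_prefix_append_iff]; exact ⟨h2, hf'⟩⟩
  · intro h
    rcases h with h | h | h | h
    · replace h : ("buy ".toList ++ ("1".toList ++ (" get ".toList ++ ("1".toList ++ " free".toList)))) <+: s := h
      rw [pv_prefix_append_iff] at h
      obtain ⟨hb, h⟩ := h
      rw [pv_prefix_append_iff] at h
      obtain ⟨h1, h⟩ := h
      rw [pv_prefix_append_iff] at h
      obtain ⟨hg, h⟩ := h
      rw [pv_prefix_append_iff] at h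
      obtain ⟨h2, hf⟩ := h
      exact pv_phraseAt_build s _ _ ((PySem.Chars.startswith_iff _ _).mpr hb)
        (pv_afterNum_1 _ h1) ((PySem.Chars.startswith_iff _ _).mpr hg)
        (pv_afterNum_1 _ h2) ((PySem.Chars.startswith_iff _ _).mpr hf)
    · replace h : ("buy ".toList ++ ("one".toList ++ (" get ".toList ++ ("one".toList ++ " free".toList)))) <+: s := h
      rw [pv_prefix_append_iff] at h
      obtain ⟨hb, h⟩ := h
      rw [pv_prefix_append_iff] at h
      obtain ⟨h1, h⟩ := h
      rw [pv_prefix_append_iff] at h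
      obtain ⟨hg, h⟩ := h
      rw [pv_prefix_append_iff] at h
      obtain ⟨h2, hf⟩ := h
      exact pv_phraseAt_build s _ _ ((PySem.Chars.startswith_iff _ _).mpr hb)
        (pv_afterNum_one _ h1) ((PySem.Chars.startswith_iff _ _).mpr hg)
        (pv_afterNum_one _ h2) ((PySem.Chars.startswith_iff _ _).mpr hf)
    · replace h : ("buy ".toList ++ ("one".toList ++ (" get ".toList ++ ("1".toList ++ " free".toList)))) <+: s := h
      rw [pv_prefix_append_iff] at h
      obtain ⟨hb, h⟩ := h
      rw [pv_prefix_append_iff] at h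
      obtain ⟨h1, h⟩ := h
      rw [pv_prefix_append_iff] at h
      obtain ⟨hg, h⟩ := h
      rw [pv_prefix_append_iff] at h
      obtain ⟨h2, hf⟩ := h
      exact pv_phraseAt_build s _ _ ((PySem.Chars.startswith_iff _ _).mpr hb)
        (pv_afterNum_one _ h1) ((PySem.Chars.startswith_iff _ _).mpr hg)
        (pv_afterNum_1 _ h2) ((PySem.Chars.startswith_iff _ _).mpr hf)
    · replace h : ("buy ".toList ++ ("1".toList ++ (" get ".toList ++ ("one".toList ++ " free".toList)))) <+: s := h
      rw [pv_prefix_append_iff] at h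
      obtain ⟨hb, h⟩ := h
      rw [pv_prefix_append_iff] at h
      obtain ⟨h1, h⟩ := h
      rw [pv_prefix_append_iff] at h
      obtain ⟨hg, h⟩ := h
      rw [pv_prefix_append_iff] at h
      obtain ⟨h2, hf⟩ := h
      exact pv_phraseAt_build s _ _ ((PySem.Chars.startswith_iff _ _).mpr hb)
        (pv_afterNum_1 _ h1) ((PySem.Chars.startswith_iff _ _).mpr hg)
        (pv_afterNum_one _ h2) ((PySem.Chars.startswith_iff _ _).mpr hf)

-- the scan succeeds iff the matcher succeeds at some position
theorem pv_scan_iff (t : List Char) :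
    pvScan t = true ↔ ∃ j, pvPhraseAt (t.drop j) = true := by
  induction t with
  | nil =>
    simp only [pvScan, List.drop_nil]
    exact ⟨fun h => ⟨0, h⟩, fun ⟨_, h⟩ => h⟩
  | cons c rest ih =>
    simp only [pvScan, Bool.or_eq_true, ih]
    constructor
    · rintro (h | ⟨j, hj⟩)
      · exact ⟨0, h⟩
      · exact ⟨j + 1, by simpa using hj⟩
    · rintro ⟨j, hj⟩
      cases j with
      | zero => exact Or.inl (by simpa using hj)
      | succ j => exact Or.inr ⟨j, by simpa using hj⟩

-- ===== VERDICT (by name: the statement is the Claim_ definition above) =====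
theorem isBogo_py_spec : Claim_equal_isBogo_py := by
  intro saleText _
  show isBogo_py saleText = isBogo_py_alt saleText
  unfold isBogo_py isBogo_py_alt
  simp only [List.any_cons, List.any_nil, Bool.or_false]
  set L := PySem.Chars.lower saleText.toList with hL
  have hstr : ∀ (p : String), PySem.Str.isIn p (PySem.Str.lower saleText) =
      PySem.Chars.isIn p.toList L := by
    intro p
    simp [pysem, hL]
  rw [hstr, hstr, hstr, hstr]
  rcases Bool.eq_false_or_eq_true (pvScan L) with hS | hS
  swap
  · -- scan false: no phrase anywhere, so each isIn is false
    have hno : ∀ j, pvPhraseAt (L.drop j) = false := by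
      intro j
      by_contra hc
      have : pvScan L = true := (pv_scan_iff L).mpr ⟨j, by simpa using hc⟩
      rw [hS] at this
      exact absurd this (by simp)
    have hiso : ∀ (p : List Char),
        (p = "buy 1 get 1 free".toList ∨ p = "buy one get one free".toList ∨
         p = "buy one get 1 free".toList ∨ p = "buy 1 get one free".toList) →
        PySem.Chars.isIn p L = false := by
      intro p hp
      rcases Bool.eq_false_or_eq_true (PySem.Chars.isIn p L) with hb' | hb'
      swap
      · exact hb'
      · obtain ⟨j, hj⟩ := (PySem.Chars.exists_prefix_drop_iff_isIn p L).mpr hb'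
        have : pvPhraseAt (L.drop j) = true :=
          (pv_phraseAt_iff (L.drop j)).mpr (by
            rcases hp with rfl | rfl | rfl | rfl
            exacts [Or.inl hj, Or.inr (Or.inl hj), Or.inr (Or.inr (Or.inl hj)),
              Or.inr (Or.inr (Or.inr hj))])
        rw [hno j] at this
        exact absurd this (by simp)
    rw [hS]
    exact Bool.or_eq_false_iff.mpr ⟨hiso _ (Or.inl rfl), Bool.or_eq_false_iff.mpr
      ⟨hiso _ (Or.inr (Or.inl rfl)), Bool.or_eq_false_iff.mpr
        ⟨hiso _ (Or.inr (Or.inr (Or.inl rfl))), hiso _ (Or.inr (Or.inr (Or.inr rfl)))⟩⟩⟩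
  · -- scan true: some phrase is a prefix at some position
    rw [hS]
    obtain ⟨j, hj⟩ := (pv_scan_iff L).mp hS
    simp only [Bool.or_eq_true]
    rcases (pv_phraseAt_iff (L.drop j)).mp hj with h | h | h | h
    · exact Or.inl ((PySem.Chars.exists_prefix_drop_iff_isIn _ L).mp ⟨j, h⟩)
    · exact Or.inr (Or.inl ((PySem.Chars.exists_prefix_drop_iff_isIn _ L).mp ⟨j, h⟩))
    · exact Or.inr (Or.inr (Or.inl ((PySem.Chars.exists_prefix_drop_iff_isIn _ L).mp ⟨j, h⟩)))
    · exact Or.inr (Or.inr (Or.inr ((PySem.Chars.exists_prefix_drop_iff_isIn _ L).mp ⟨j, h⟩)))
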